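-- pv_equiv track=rewrite | github.com/lionelgonzalo/Parcial_Recuratorio_Programacion_1 | Primer_Parcial_Programacion.py | sumar_votos_por_turno
-- ===== SOURCE A (Python) =====
-- def sumar_votos_por_turno(matriz: list) -> list:
--     '''
--     Calcula la suma de votos por cada turno (mañana, tarde, noche) y la devuelve en una lista.
--     '''
--     votos_mañana = 0
--     votos_tarde = 0
--     votos_noche = 0
--
--     for fil in range(len(matriz)):
--         votos_mañana += matriz[fil][1]
--         votos_tarde += matriz[fil][2]
--         votos_noche += matriz[fil][3]
--
--     matriz_turnos_votos = [["mañana", votos_mañana],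
--                     ["tarde", votos_tarde],
--                     ["noche", votos_noche]]
--
--     return matriz_turnos_votos
-- ===== SOURCE B (Python) =====
-- def sumar_votos_por_turno(matriz: list) -> list:
--     '''
--     Calcula la suma de votos por cada turno (mañana, tarde, noche) y la devuelve en una lista.
--     '''
--     return [["mañana", sum(fila[1] for fila in matriz)],
--             ["tarde", sum(fila[2] for fila in matriz)],
--             ["noche", sum(fila[3] for fila in matriz)]]
-- ===== Notes on version B (the rewrite author's own statement) =====
-- stated objective: simpler
-- what changed: Replaces the index-based loop threading three accumulators with three independent column sums (one sum-comprehension per shift), building the result list directly.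
import Mathlib
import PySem

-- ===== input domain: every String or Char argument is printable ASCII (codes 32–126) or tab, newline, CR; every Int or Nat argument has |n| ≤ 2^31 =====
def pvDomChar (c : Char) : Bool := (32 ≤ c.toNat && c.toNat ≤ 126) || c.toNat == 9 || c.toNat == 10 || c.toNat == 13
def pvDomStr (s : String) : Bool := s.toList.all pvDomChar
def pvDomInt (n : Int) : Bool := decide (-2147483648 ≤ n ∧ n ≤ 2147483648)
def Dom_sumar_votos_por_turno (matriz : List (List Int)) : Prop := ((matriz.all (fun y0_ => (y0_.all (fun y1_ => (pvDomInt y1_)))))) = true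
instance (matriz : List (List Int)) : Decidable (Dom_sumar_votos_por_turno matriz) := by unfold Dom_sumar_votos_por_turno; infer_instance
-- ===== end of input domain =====

-- B replaces A's single index loop threading three accumulators by three independent column sums; objective: simpler.

-- ===== PORT A =====
-- one pass: for fil in range(len(matriz)): add matriz[fil][1], [2], [3] to the three accumulators
def sumar_votos_por_turno (matriz : List (List Int)) : List (String × Int) :=
  let s := (PySem.List.pyRange 0 matriz.length 1).foldl
    (fun (acc : Int × Int × Int) fil =>
      let fila := PySem.List.pyGetD matriz fil []
      (acc.1 + PySem.List.pyGetD fila 1 0,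
       acc.2.1 + PySem.List.pyGetD fila 2 0,
       acc.2.2 + PySem.List.pyGetD fila 3 0))
    (0, 0, 0)
  [("mañana", s.1), ("tarde", s.2.1), ("noche", s.2.2)]

-- ===== PORT B =====
-- three independent column sums
def sumar_votos_por_turno_alt (matriz : List (List Int)) : List (String × Int) :=
  [("mañana", (matriz.map (fun fila => PySem.List.pyGetD fila 1 0)).sum),
   ("tarde",  (matriz.map (fun fila => PySem.List.pyGetD fila 2 0)).sum),
   ("noche",  (matriz.map (fun fila => PySem.List.pyGetD fila 3 0)).sum)]

-- ===== PRECONDITION & SPEC =====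
-- Pre_ excludes exactly the inputs where A raises IndexError: some row shorter than 4 (B raises there too).
def Pre_sumar_votos_por_turno (matriz : List (List Int)) : Prop :=
  ∀ fila ∈ matriz, 4 ≤ fila.length
instance (matriz : List (List Int)) : Decidable (Pre_sumar_votos_por_turno matriz) := by unfold Pre_sumar_votos_por_turno; infer_instance
def pvWitness_sumar_votos_por_turno : List (List Int) := [[1, 2, 3, 4], [5, 6, 7, 8]]

def Spec_sumar_votos_por_turno (matriz : List (List Int)) (out : List (String × Int)) : Prop := out = sumar_votos_por_turno_alt matriz
instance (matriz : List (List Int)) (out : List (String × Int)) : Decidable (Spec_sumar_votos_por_turno matriz out) := by unfold Spec_sumar_votos_por_turno; infer_instance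

-- ===== CLAIM (what is proved, stated in full; the proofs are below) =====
def Claim_equal_sumar_votos_por_turno : Prop := ∀ (matriz : List (List Int)), Dom_sumar_votos_por_turno matriz → Pre_sumar_votos_por_turno matriz → Spec_sumar_votos_por_turno matriz (sumar_votos_por_turno matriz)

-- ===== LEMMAS AND PROOFS =====

-- A's interleaved fold computes the three column sums componentwise.
theorem foldl_triple (l : List (List Int)) (a b c : Int) :
    l.foldl
      (fun (acc : Int × Int × Int) fila =>
        (acc.1 + PySem.List.pyGetD fila 1 0,
         acc.2.1 + PySem.List.pyGetD fila 2 0,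
         acc.2.2 + PySem.List.pyGetD fila 3 0))
      (a, b, c)
    = (a + (l.map (fun fila => PySem.List.pyGetD fila 1 0)).sum,
       b + (l.map (fun fila => PySem.List.pyGetD fila 2 0)).sum,
       c + (l.map (fun fila => PySem.List.pyGetD fila 3 0)).sum) := by
  induction l generalizing a b c with
  | nil => simp
  | cons x xs ih => simp [List.foldl_cons, ih, add_assoc]

-- ===== VERDICT (by name: the statement is the Claim_ definition above) =====
theorem sumar_votos_por_turno_spec : Claim_equal_sumar_votos_por_turno := by
  intro matriz _ _
  show _ = _
  simp only [sumar_votos_por_turno, sumar_votos_por_turno_alt]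
  rw [PySem.List.foldl_pyRange_pyGetD' matriz []
        (fun (acc : Int × Int × Int) fila =>
          (acc.1 + PySem.List.pyGetD fila 1 0,
           acc.2.1 + PySem.List.pyGetD fila 2 0,
           acc.2.2 + PySem.List.pyGetD fila 3 0))
        (0, 0, 0) (by omega : (0:Int) ≤ 0)]
  simp [foldl_triple]
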